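-- pv_equiv track=rewrite | github.com/Aasthaengg/IBMdataset | Python_codes/p02802/s677795730.py | solve
-- ===== SOURCE A (Python) =====
-- def solve(N: int, M: int, P: "List[int]", S: "List[str]"):
--     ac = [0] * N
--     wa = [0] * N
--     for p, s in zip(P, S):
--         if s == "AC":
--             ac[p - 1] = 1
--         else:  # WA
--             if ac[p - 1] == 0:
--                 wa[p - 1] += 1
--     for i in range(N):
--         if ac[i] == 0:
--             wa[i] = 0
--
--     return sum(ac), sum(wa)
-- ===== SOURCE B (Python) =====
-- def solve(N: int, M: int, P: "List[int]", S: "List[str]"):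
--     groups = {}
--     for p, s in zip(P, S):
--         groups.setdefault(p, []).append(s)
--     accepted = 0
--     penalty = 0
--     for p in range(1, N + 1):
--         verdicts = groups.get(p, [])
--         if "AC" in verdicts:
--             accepted += 1
--             for v in verdicts:
--                 if v == "AC":
--                     break
--                 penalty += 1
--     return accepted, penalty
-- ===== Notes on version B (the rewrite author's own statement) =====
-- stated objective: alternative
-- what changed: B replaces A's two mutable arrays (indexed updates per submission plus a cleanup pass zeroing penalties of unsolved problems) by a dict grouping each problem id's verdicts in submission order, then one scan per problem 1..N counting the wrong answers before its first AC; …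
-- outside the precondition, e.g. on solve(2, 1, [0], ['AC']): A returns (1, 0), B returns (0, 0); on solve(2, 2, [0, 2], ['WA', 'AC']): A returns (1, 1), B returns (1, 0); on solve(1, 1, [3], ['AC']): A raises IndexError, B returns (0, 0)
import Mathlib
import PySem

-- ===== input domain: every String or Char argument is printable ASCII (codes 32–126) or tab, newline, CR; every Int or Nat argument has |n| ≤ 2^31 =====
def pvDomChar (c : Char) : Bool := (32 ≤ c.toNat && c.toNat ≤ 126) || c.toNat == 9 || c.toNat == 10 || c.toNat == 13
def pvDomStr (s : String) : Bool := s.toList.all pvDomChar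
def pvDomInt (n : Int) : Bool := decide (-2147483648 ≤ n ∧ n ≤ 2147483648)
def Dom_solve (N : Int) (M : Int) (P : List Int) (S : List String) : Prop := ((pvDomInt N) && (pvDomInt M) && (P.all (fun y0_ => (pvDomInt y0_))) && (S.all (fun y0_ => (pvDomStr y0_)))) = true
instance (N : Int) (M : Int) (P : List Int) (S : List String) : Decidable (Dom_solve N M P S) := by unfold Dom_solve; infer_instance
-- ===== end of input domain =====

-- B groups each problem id's verdicts in a dict and counts its pre-AC wrong answers in one scan
-- over problems 1..N, instead of A's two mutable arrays updated per submission plus a cleanup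
-- pass (objective: alternative decomposition, same asymptotic cost).

-- ===== PORT A =====
-- Python lists are mutable arrays, so A's ac/wa are ported as Array Int; pyAGet/pyASet are Python's
-- x[i] read/write with negative-index wrap, exact wherever Python does not raise IndexError.
def pyAGet (a : Array Int) (i : Int) (d : Int) : Int :=
  let idx := if i < 0 then i + a.size else i
  if 0 ≤ idx ∧ idx < (a.size : Int) then a.getD idx.toNat d else d

def pyASet (a : Array Int) (i : Int) (v : Int) : Array Int :=
  let idx := if i < 0 then i + a.size else i
  if 0 ≤ idx ∧ idx < (a.size : Int) then a.setIfInBounds idx.toNat v else a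

def solve (N : Int) (M : Int) (P : List Int) (S : List String) : Int × Int :=
  let ac : Array Int := Array.replicate N.toNat 0
  let wa : Array Int := Array.replicate N.toNat 0
  let st := (P.zip S).foldl (fun (st : Array Int × Array Int) ps =>
      if ps.2 = "AC" then
        (pyASet st.1 (ps.1 - 1) 1, st.2)
      else
        if pyAGet st.1 (ps.1 - 1) 0 = 0 then
          (st.1, pyASet st.2 (ps.1 - 1) (pyAGet st.2 (ps.1 - 1) 0 + 1))
        else
          (st.1, st.2)) (ac, wa)
  let wa2 := (PySem.List.pyRange 0 N 1).foldl (fun wa i =>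
      if pyAGet st.1 i 0 = 0 then pyASet wa i 0 else wa) st.2
  (st.1.foldl (· + ·) 0, wa2.foldl (· + ·) 0)

-- ===== PORT B =====
def solve_groups (pairs : List (Int × String)) : PySem.Dict Int (List String) :=
  pairs.foldl (fun d ps => PySem.Dict.modify d ps.1 [] (· ++ [ps.2])) PySem.Dict.empty

def solve_countBeforeAC : List String → Int
  | [] => 0
  | v :: vs => if v = "AC" then 0 else 1 + solve_countBeforeAC vs

def solve_alt (N : Int) (M : Int) (P : List Int) (S : List String) : Int × Int :=
  let groups := solve_groups (P.zip S)
  (PySem.List.pyRange 1 (N + 1) 1).foldl (fun st p =>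
      let verdicts := PySem.Dict.getD groups p []
      if verdicts.contains "AC" then
        (st.1 + 1, st.2 + solve_countBeforeAC verdicts)
      else st) ((0 : Int), (0 : Int))

-- ===== PRECONDITION & SPEC =====
-- Pre_ keeps the problem's natural domain (every zipped submission's problem id in 1..N) and,
-- in addition, admits out-of-range ids 1-N..0 exactly where A's accidental negative-index
-- wraparound provably cannot change the totals: non-AC submissions whose wrapped slot never
-- receives an AC (A's cleanup pass then zeroes the penalty it wrote). It excludes the remaining
-- wrap cases, whose value is an artefact of A's indexing, and ids outside 1-N..N, on which A
-- raises IndexError.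
def Pre_solve (N : Int) (M : Int) (P : List Int) (S : List String) : Prop :=
  ∀ pr ∈ P.zip S,
    (1 ≤ pr.1 ∧ pr.1 ≤ N) ∨
    (1 - N ≤ pr.1 ∧ pr.1 ≤ 0 ∧ pr.2 ≠ "AC" ∧
      ∀ qr ∈ P.zip S, qr.2 = "AC" → qr.1 ≠ pr.1 + N)
instance (N : Int) (M : Int) (P : List Int) (S : List String) : Decidable (Pre_solve N M P S) := by unfold Pre_solve; infer_instance
def pvWitness_solve : Int × Int × List Int × List String :=
  (3, 4, [1, 2, 1, 3], ["WA", "AC", "AC", "WA"])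

def Spec_solve (N : Int) (M : Int) (P : List Int) (S : List String) (out : Int × Int) : Prop :=
  out = solve_alt N M P S
instance (N : Int) (M : Int) (P : List Int) (S : List String) (out : Int × Int) : Decidable (Spec_solve N M P S out) := by unfold Spec_solve; infer_instance

-- ===== CLAIM (what is proved, stated in full; the proofs are below) =====
def Claim_equal_solve : Prop := ∀ (N : Int) (M : Int) (P : List Int) (S : List String), Dom_solve N M P S → Pre_solve N M P S → Spec_solve N M P S (solve N M P S)

-- ===== LEMMAS AND PROOFS =====

-- the array slot A's ac[p-1]/wa[p-1] touch for problem id p (p-1, Python negative-index wrap)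
def slotF (N : Int) (p : Int) : Int :=
  if p - 1 < 0 then p - 1 + N else p - 1

-- the verdicts landing on slot k, in submission order
def vmapS (N : Int) (L : List (Int × String)) (k : Int) : List String :=
  ((L.map (fun pr => (slotF N pr.1, pr.2))).filter (fun q => q.1 == k)).map (·.2)

-- the verdicts submitted for problem id k, in submission order
def vmapP (L : List (Int × String)) (k : Int) : List String :=
  (L.filter (fun pr => pr.1 == k)).map (·.2)

def notAC (v : String) : Bool := v != "AC"

lemma vmapS_cons (N : Int) (p : Int) (s : String) (L : List (Int × String)) (k : Int) :
    vmapS N ((p, s) :: L) k = if slotF N p = k then s :: vmapS N L k else vmapS N L k := by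
  by_cases h : slotF N p = k <;> simp [vmapS, h]

lemma cnt_eq (vs : List String) :
    solve_countBeforeAC vs = ((vs.takeWhile notAC).length : Int) := by
  induction vs with
  | nil => simp [solve_countBeforeAC]
  | cons v vs ih =>
    by_cases h : v = "AC" <;>
      simp [solve_countBeforeAC, notAC, h, ih] <;> push_cast <;> ring

lemma groups_getD (L : List (Int × String)) (k : Int) :
    (solve_groups L).getD k [] = vmapP L k := by
  unfold solve_groups
  rw [PySem.Dict.getD_foldl_modify_append]
  simp [vmapP]

lemma pyAGet_eq (a : Array Int) (i : Int) (j0 : Nat)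
    (hj : ((j0 : Int)) = if i < 0 then i + a.size else i) (hjs : j0 < a.size) :
    pyAGet a i 0 = a[j0]?.getD 0 := by
  simp only [pyAGet]
  rw [← hj, if_pos ⟨by omega, by omega⟩]
  simp [Array.getD, hjs]

lemma pyASet_eq (a : Array Int) (i : Int) (v : Int) (j0 : Nat)
    (hj : ((j0 : Int)) = if i < 0 then i + a.size else i) (hjs : j0 < a.size) :
    pyASet a i v = a.setIfInBounds j0 v := by
  simp only [pyASet]
  rw [← hj, if_pos ⟨by omega, by omega⟩]
  simp

lemma aget_set (a : Array Int) (i j : Nat) (v : Int) (hi : i < a.size) :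
    (a.setIfInBounds i v)[j]?.getD 0 = if j = i then v else a[j]?.getD 0 := by
  by_cases h : j = i
  · subst h
    simp [hi]
  · have h' : ¬ i = j := fun hh => h hh.symm
    simp [h, h']

lemma aget_replicate (n j : Nat) : (Array.replicate n (0 : Int))[j]?.getD 0 = 0 := by
  rcases Nat.lt_or_ge j n with h | h
  · simp [h]
  · rw [Array.getElem?_eq_none (by simpa using h)]
    rfl

lemma toList_eq_map_range (a : Array Int) (m : Nat) (f : Nat → Int)
    (hlen : a.size = m) (hpt : ∀ j < m, a[j]?.getD 0 = f j) :
    a.toList = (List.range m).map f := by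
  apply List.ext_getElem
  · simp [hlen]
  · intro j h1 h2
    have hj : j < m := by simpa [hlen] using h2
    have := hpt j hj
    rw [Array.getElem?_eq_getElem (by omega : j < a.size)] at this
    simp only [Option.getD_some] at this
    simp [Array.getElem_toList, List.getElem_map, List.getElem_range, this]

lemma foldB_char (G : PySem.Dict Int (List String)) (R : List Int) :
    ∀ st : Int × Int,
      R.foldl (fun st p =>
          let verdicts := PySem.Dict.getD G p []
          if verdicts.contains "AC" then
            (st.1 + 1, st.2 + solve_countBeforeAC verdicts)
          else st) st
      = (st.1 + (R.map (fun p => if (PySem.Dict.getD G p []).contains "AC" then (1 : Int) else 0)).sum,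
         st.2 + (R.map (fun p => if (PySem.Dict.getD G p []).contains "AC" then solve_countBeforeAC (PySem.Dict.getD G p []) else 0)).sum) := by
  induction R with
  | nil => intro st; simp
  | cons p R ih =>
    intro st
    simp only [List.foldl_cons, List.map_cons, List.sum_cons]
    by_cases h : (PySem.Dict.getD G p []).contains "AC" <;>
      simp only [h, if_true, if_false, ih] <;> simp [Prod.ext_iff] <;> constructor <;> ring

lemma foldA_char (N : Int) (n : Nat) (hn : N.toNat = n) :
    ∀ (L : List (Int × String)) (ac wa : Array Int),
      (∀ pr ∈ L, -(n : Int) ≤ pr.1 - 1 ∧ pr.1 - 1 < (n : Int)) → ac.size = n → wa.size = n →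
      ((L.foldl (fun (st : Array Int × Array Int) ps =>
          if ps.2 = "AC" then
            (pyASet st.1 (ps.1 - 1) 1, st.2)
          else
            if pyAGet st.1 (ps.1 - 1) 0 = 0 then
              (st.1, pyASet st.2 (ps.1 - 1) (pyAGet st.2 (ps.1 - 1) 0 + 1))
            else
              (st.1, st.2)) (ac, wa)).1.size = n ∧
       (L.foldl (fun (st : Array Int × Array Int) ps =>
          if ps.2 = "AC" then
            (pyASet st.1 (ps.1 - 1) 1, st.2)
          else
            if pyAGet st.1 (ps.1 - 1) 0 = 0 then
              (st.1, pyASet st.2 (ps.1 - 1) (pyAGet st.2 (ps.1 - 1) 0 + 1))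
            else
              (st.1, st.2)) (ac, wa)).2.size = n) ∧
      ∀ j : Nat, j < n →
        (L.foldl (fun (st : Array Int × Array Int) ps =>
          if ps.2 = "AC" then
            (pyASet st.1 (ps.1 - 1) 1, st.2)
          else
            if pyAGet st.1 (ps.1 - 1) 0 = 0 then
              (st.1, pyASet st.2 (ps.1 - 1) (pyAGet st.2 (ps.1 - 1) 0 + 1))
            else
              (st.1, st.2)) (ac, wa)).1[j]?.getD 0
          = (if (vmapS N L (j : Int)).contains "AC" then 1 else ac[j]?.getD 0) ∧
        (L.foldl (fun (st : Array Int × Array Int) ps =>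
          if ps.2 = "AC" then
            (pyASet st.1 (ps.1 - 1) 1, st.2)
          else
            if pyAGet st.1 (ps.1 - 1) 0 = 0 then
              (st.1, pyASet st.2 (ps.1 - 1) (pyAGet st.2 (ps.1 - 1) 0 + 1))
            else
              (st.1, st.2)) (ac, wa)).2[j]?.getD 0
          = (if ac[j]?.getD 0 = 0 then
               wa[j]?.getD 0 + (((vmapS N L (j : Int)).takeWhile notAC).length : Int)
             else wa[j]?.getD 0) := by
  intro L
  induction L with
  | nil => intro ac wa _ hac hwa; refine ⟨⟨hac, hwa⟩, ?_⟩; intro j _; simp [vmapS]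
  | cons pr L ih =>
    intro ac wa hL hac hwa
    obtain ⟨p, s⟩ := pr
    have hp := hL (p, s) (List.mem_cons_self ..)
    have hnpos : 0 < n := by omega
    have hNn : N = (n : Int) := by omega
    have hslot : ∀ (m : Nat), m = n →
        (if p - 1 < 0 then p - 1 + (m : Int) else p - 1) = slotF N p := by
      intro m hm
      simp only [slotF, hm, hNn]
    have h01 : 0 ≤ slotF N p ∧ slotF N p < (n : Int) := by
      rw [← hslot n rfl]
      split_ifs <;> omega
    have hj0 : (((slotF N p).toNat : Int)) = slotF N p := by omega
    have hj0n : (slotF N p).toNat < n := by omega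
    have hkey : ∀ j : Nat, (slotF N p = (j : Int)) ↔ j = (slotF N p).toNat := by
      intro j; omega
    have hsetac : ∀ (xs : Array Int) (v : Int), xs.size = n →
        pyASet xs (p - 1) v = xs.setIfInBounds (slotF N p).toNat v := by
      intro xs v hxs
      exact pyASet_eq xs (p - 1) v _ (by rw [hj0, ← hslot xs.size hxs]) (by omega)
    have hgetd : ∀ (xs : Array Int), xs.size = n →
        pyAGet xs (p - 1) 0 = xs[(slotF N p).toNat]?.getD 0 := by
      intro xs hxs
      exact pyAGet_eq xs (p - 1) _ (by rw [hj0, ← hslot xs.size hxs]) (by omega)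
    simp only [List.foldl_cons]
    by_cases hs : s = "AC"
    · -- AC: set ac[slot] := 1
      simp only [hs, if_true, hsetac ac 1 hac]
      have ihres := ih (ac.setIfInBounds (slotF N p).toNat 1) wa
        (fun q hq => hL q (List.mem_cons_of_mem _ hq)) (by simp [hac]) hwa
      refine ⟨ihres.1, ?_⟩
      intro j hj
      obtain ⟨iha, ihw⟩ := ihres.2 j hj
      rw [vmapS_cons]
      by_cases hjj : j = (slotF N p).toNat
      · have hpk : slotF N p = (j : Int) := (hkey j).mpr hjj
        constructor
        · rw [iha, aget_set ac (slotF N p).toNat j 1 (by omega), if_pos hpk, if_pos hjj]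
          simp
        · rw [ihw, aget_set ac (slotF N p).toNat j 1 (by omega), if_pos hpk, if_pos hjj]
          simp [notAC]
      · have hne : ¬ (slotF N p = (j : Int)) := fun hc => hjj ((hkey j).mp hc)
        constructor
        · rw [iha, aget_set ac (slotF N p).toNat j 1 (by omega)]
          rw [if_neg hne, if_neg hjj]
        · rw [ihw, aget_set ac (slotF N p).toNat j 1 (by omega)]
          rw [if_neg hne, if_neg hjj]
    · -- non-AC
      simp only [hs, if_false, hgetd ac hac]
      by_cases hz : ac[(slotF N p).toNat]?.getD 0 = 0
      · -- wa[slot] += 1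
        simp only [hz, if_true, hsetac wa _ hwa, hgetd wa hwa]
        have ihres := ih ac (wa.setIfInBounds (slotF N p).toNat (wa[(slotF N p).toNat]?.getD 0 + 1))
          (fun q hq => hL q (List.mem_cons_of_mem _ hq)) hac (by simp [hwa])
        refine ⟨ihres.1, ?_⟩
        intro j hj
        obtain ⟨iha, ihw⟩ := ihres.2 j hj
        rw [vmapS_cons]
        by_cases hjj : j = (slotF N p).toNat
        · have hpk : slotF N p = (j : Int) := (hkey j).mpr hjj
          have hac' : ¬ ("AC" = s) := fun h => hs h.symm
          have hzj : ac[j]?.getD 0 = 0 := by rw [hjj]; exact hz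
          constructor
          · rw [iha, if_pos hpk]
            simp [hac']
          · rw [ihw, aget_set wa (slotF N p).toNat j (wa[(slotF N p).toNat]?.getD 0 + 1) (by omega),
              if_pos hpk, if_pos hzj, if_pos hzj, if_pos hjj]
            have hna : notAC s = true := by simp [notAC, hs]
            rw [hjj]
            simp [hna]
            push_cast
            ring
        · have hne : ¬ (slotF N p = (j : Int)) := fun hc => hjj ((hkey j).mp hc)
          constructor
          · rw [iha]; rw [if_neg hne]
          · rw [ihw, aget_set wa (slotF N p).toNat j (wa[(slotF N p).toNat]?.getD 0 + 1) (by omega)]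
            rw [if_neg hne, if_neg hjj]
      · -- ignored
        simp only [hz, if_false]
        have ihres := ih ac wa (fun q hq => hL q (List.mem_cons_of_mem _ hq)) hac hwa
        refine ⟨ihres.1, ?_⟩
        intro j hj
        obtain ⟨iha, ihw⟩ := ihres.2 j hj
        rw [vmapS_cons]
        by_cases hjj : j = (slotF N p).toNat
        · have hpk : slotF N p = (j : Int) := (hkey j).mpr hjj
          have hac' : ¬ ("AC" = s) := fun h => hs h.symm
          have hzj : ¬ ac[j]?.getD 0 = 0 := by rw [hjj]; exact hz
          constructor
          · rw [iha, if_pos hpk]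
            simp [hac']
          · rw [ihw, if_neg hzj, if_neg hzj]
        · have hne : ¬ (slotF N p = (j : Int)) := fun hc => hjj ((hkey j).mp hc)
          constructor
          · rw [iha]; rw [if_neg hne]
          · rw [ihw]; rw [if_neg hne]

lemma foldC_char (acF : Array Int) (n : Nat) (hacl : acF.size = n) :
    ∀ (R : List Nat) (wa : Array Int), wa.size = n → (∀ i ∈ R, i < n) →
      (((R.map (fun i : Nat => (i : Int))).foldl (fun wa i =>
          if pyAGet acF i 0 = 0 then pyASet wa i 0 else wa) wa).size = n ∧
       ∀ j : Nat, j < n →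
        ((R.map (fun i : Nat => (i : Int))).foldl (fun wa i =>
          if pyAGet acF i 0 = 0 then pyASet wa i 0 else wa) wa)[j]?.getD 0
          = if j ∈ R ∧ acF[j]?.getD 0 = 0 then 0 else wa[j]?.getD 0) := by
  intro R
  induction R with
  | nil => intro wa hwa _; exact ⟨hwa, by intro j _; simp⟩
  | cons i R ih =>
    intro wa hwa hR
    have hi : i < n := hR i (List.mem_cons_self ..)
    have hgc : pyAGet acF ((i : Nat) : Int) 0 = acF[i]?.getD 0 :=
      pyAGet_eq acF i i (by simp) (by omega)
    simp only [List.map_cons, List.foldl_cons, hgc]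
    by_cases hc : acF[i]?.getD 0 = 0
    · rw [if_pos hc, pyASet_eq wa i 0 i (by simp) (by omega)]
      have ihres := ih (wa.setIfInBounds i 0) (by simp [hwa]) (fun q hq => hR q (List.mem_cons_of_mem _ hq))
      refine ⟨ihres.1, ?_⟩
      intro j hj
      rw [ihres.2 j hj, aget_set wa i j 0 (by omega)]
      by_cases hji : j = i
      · subst hji
        simp [hc, List.mem_cons]
      · simp [List.mem_cons, hji]
    · rw [if_neg hc]
      have ihres := ih wa hwa (fun q hq => hR q (List.mem_cons_of_mem _ hq))
      refine ⟨ihres.1, ?_⟩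
      intro j hj
      rw [ihres.2 j hj]
      by_cases hji : j = i
      · subst hji; simp [hc]
      · simp [List.mem_cons, hji]

lemma mem_vmapS (N : Int) (L : List (Int × String)) (k : Int) (v : String) :
    v ∈ vmapS N L k ↔ ∃ pr ∈ L, slotF N pr.1 = k ∧ pr.2 = v := by
  simp only [vmapS, List.mem_map, List.mem_filter, beq_iff_eq]
  constructor
  · rintro ⟨⟨k', s'⟩, ⟨⟨pr, hprL, hpe⟩, hk⟩, hv⟩
    exact ⟨pr, hprL, by simp_all [Prod.ext_iff]⟩
  · rintro ⟨pr, hprL, hsl, hv⟩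
    exact ⟨(slotF N pr.1, pr.2), ⟨⟨pr, hprL, rfl⟩, hsl⟩, hv⟩

lemma mem_vmapP (L : List (Int × String)) (k : Int) (v : String) :
    v ∈ vmapP L k ↔ ∃ pr ∈ L, pr.1 = k ∧ pr.2 = v := by
  simp only [vmapP, List.mem_map, List.mem_filter, beq_iff_eq]
  constructor
  · rintro ⟨pr, ⟨hprL, hk⟩, hv⟩
    exact ⟨pr, hprL, hk, hv⟩
  · rintro ⟨pr, hprL, hk, hv⟩
    exact ⟨pr, ⟨hprL, hk⟩, hv⟩

lemma slot_bridge (N : Int) (L : List (Int × String))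
    (hpre : ∀ pr ∈ L,
      (1 ≤ pr.1 ∧ pr.1 ≤ N) ∨
      (1 - N ≤ pr.1 ∧ pr.1 ≤ 0 ∧ pr.2 ≠ "AC" ∧
        ∀ qr ∈ L, qr.2 = "AC" → qr.1 ≠ pr.1 + N))
    (j : Nat) :
    ((vmapS N L (j : Int)).contains "AC" = (vmapP L ((j : Int) + 1)).contains "AC") ∧
    ((vmapS N L (j : Int)).contains "AC" = true → vmapS N L (j : Int) = vmapP L ((j : Int) + 1)) := by
  by_cases hw : ∃ pr ∈ L, pr.1 ≤ 0 ∧ slotF N pr.1 = (j : Int)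
  · obtain ⟨q, hqL, hq0, hqs⟩ := hw
    rcases hpre q hqL with ⟨h1, _⟩ | ⟨hb, h0, hne, hall⟩
    · omega
    · have hqkey : q.1 + N = (j : Int) + 1 := by
        have hsf : slotF N q.1 = q.1 - 1 + N := by
          simp only [slotF, if_pos (show q.1 - 1 < (0:Int) by omega)]
        omega
      have hnoS : ¬ ("AC" ∈ vmapS N L (j : Int)) := by
        intro hmem
        obtain ⟨pr, hprL, hsl, hv⟩ := (mem_vmapS N L _ _).mp hmem
        rcases hpre pr hprL with ⟨hp1, hp2⟩ | ⟨_, _, hne', _⟩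
        · have : slotF N pr.1 = pr.1 - 1 := by
            simp only [slotF, if_neg (show ¬ (pr.1 - 1 < (0:Int)) by omega)]
          exact hall pr hprL hv (by omega)
        · exact hne' hv
      have hnoP : ¬ ("AC" ∈ vmapP L ((j : Int) + 1)) := by
        intro hmem
        obtain ⟨pr, hprL, hk, hv⟩ := (mem_vmapP L _ _).mp hmem
        exact hall pr hprL hv (by omega)
      constructor
      · simp [hnoS, hnoP]
      · intro hc
        simp [hnoS] at hc
  · have hfilt : ∀ pr ∈ L, ((fun pr : Int × String => pr.1 == (j : Int) + 1) pr)
        = (((fun q : Int × String => q.1 == (j : Int)) ∘ (fun pr : Int × String => (slotF N pr.1, pr.2))) pr) := by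
      intro pr hpr
      show (pr.1 == (j : Int) + 1) = (slotF N pr.1 == (j : Int))
      rcases hpre pr hpr with ⟨hp1, hp2⟩ | ⟨hb, h0, _, _⟩
      · have hsf : slotF N pr.1 = pr.1 - 1 := by
          simp only [slotF, if_neg (show ¬ (pr.1 - 1 < (0:Int)) by omega)]
        simp only [hsf]
        by_cases he : pr.1 = (j : Int) + 1
        · simp [he]
        · rw [beq_eq_false_iff_ne.mpr he, beq_eq_false_iff_ne.mpr (by omega)]
      · have hns : slotF N pr.1 ≠ (j : Int) := fun hc => hw ⟨pr, hpr, by omega, hc⟩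
        rw [beq_eq_false_iff_ne.mpr (by omega : pr.1 ≠ (j : Int) + 1),
          beq_eq_false_iff_ne.mpr hns]
    have heq : vmapS N L (j : Int) = vmapP L ((j : Int) + 1) := by
      unfold vmapS vmapP
      rw [List.filter_map, List.map_map, ← List.filter_congr hfilt]
      rfl
    exact ⟨by rw [heq], fun _ => heq⟩

-- ===== VERDICT (by name: the statement is the Claim_ definition above) =====
theorem solve_spec : Claim_equal_solve := by
  intro N M P S _ hpre
  unfold Spec_solve
  set n : Nat := N.toNat with hn
  set L : List (Int × String) := P.zip S with hLdef
  have hL : ∀ pr ∈ L, -(n : Int) ≤ pr.1 - 1 ∧ pr.1 - 1 < (n : Int) := by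
    intro pr hpr
    rcases hpre pr hpr with ⟨h1, h2⟩ | ⟨hb, h0, _, _⟩ <;> omega
  have hbridge := slot_bridge N L hpre
  have hA := foldA_char N n hn.symm L (Array.replicate n 0) (Array.replicate n 0) hL
    (by simp) (by simp)
  set stA := (L.foldl (fun (st : Array Int × Array Int) ps =>
      if ps.2 = "AC" then
        (pyASet st.1 (ps.1 - 1) 1, st.2)
      else
        if pyAGet st.1 (ps.1 - 1) 0 = 0 then
          (st.1, pyASet st.2 (ps.1 - 1) (pyAGet st.2 (ps.1 - 1) 0 + 1))
        else
          (st.1, st.2)) (Array.replicate n 0, Array.replicate n 0)) with hstA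
  obtain ⟨⟨hl1, hl2⟩, hpt⟩ := hA
  have hgetF : ∀ j, j < n → stA.1[j]?.getD 0 =
      (if (vmapS N L ((j : Int))).contains "AC" then (1 : Int) else 0) := by
    intro j hj
    rw [(hpt j hj).1]
    by_cases hc : (vmapS N L ((j : Int))).contains "AC" <;> simp [hc, aget_replicate]
  have hacF : stA.1.toList = (List.range n).map
      (fun j : Nat => if (vmapS N L ((j : Int))).contains "AC" then (1 : Int) else 0) :=
    toList_eq_map_range _ n _ hl1 hgetF
  have hwaPre : ∀ j, j < n → stA.2[j]?.getD 0 =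
      (((vmapS N L ((j : Int))).takeWhile notAC).length : Int) := by
    intro j hj
    rw [(hpt j hj).2]
    simp [aget_replicate]
  obtain ⟨hcl, hcpt⟩ := foldC_char stA.1 n hl1 (List.range n) stA.2 hl2
    (fun i hi => List.mem_range.mp hi)
  have hwa2pt : ∀ j, j < n →
      (((List.range n).map (fun i : Nat => (i : Int))).foldl (fun wa i =>
        if pyAGet stA.1 i 0 = 0 then pyASet wa i 0 else wa) stA.2)[j]?.getD 0
      = (if (vmapS N L ((j : Int))).contains "AC"
         then (((vmapS N L ((j : Int))).takeWhile notAC).length : Int) else 0) := by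
    intro j hj
    rw [hcpt j hj, hgetF j hj]
    by_cases hc : (vmapS N L ((j : Int))).contains "AC" = true
    · have h1 : ¬ (j ∈ List.range n ∧
          (if (vmapS N L ((j : Int))).contains "AC" then (1 : Int) else 0) = 0) := by
        rintro ⟨-, hB⟩
        rw [if_pos hc] at hB
        exact one_ne_zero hB
      rw [if_neg h1, hwaPre j hj, if_pos hc]
    · have h1 : j ∈ List.range n ∧
          (if (vmapS N L ((j : Int))).contains "AC" then (1 : Int) else 0) = 0 := by
        exact ⟨List.mem_range.mpr hj, by rw [if_neg hc]⟩
      rw [if_pos h1, if_neg hc]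
  have hwa2 : (((List.range n).map (fun i : Nat => (i : Int))).foldl (fun wa i =>
        if pyAGet stA.1 i 0 = 0 then pyASet wa i 0 else wa) stA.2).toList
      = (List.range n).map (fun j : Nat =>
          if (vmapS N L ((j : Int))).contains "AC"
          then (((vmapS N L ((j : Int))).takeWhile notAC).length : Int) else 0) :=
    toList_eq_map_range _ n _ hcl hwa2pt
  have hR0 : PySem.List.pyRange 0 N 1 = (List.range n).map (fun k : Nat => (k : Int)) := by
    rw [PySem.List.pyRange_one]
    norm_num [hn]
  have hR1 : PySem.List.pyRange 1 (N + 1) 1 = (List.range n).map (fun k : Nat => (k : Int) + 1) := by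
    rw [PySem.List.pyRange_one]
    have hnn : (N + 1 - 1).toNat = n := by omega
    rw [hnn]
    apply List.map_congr_left
    intro k _
    ring
  have hLHS : solve N M P S =
      (((List.range n).map (fun j : Nat =>
          if (vmapS N L ((j : Int))).contains "AC" then (1 : Int) else 0)).sum,
       ((List.range n).map (fun j : Nat =>
          if (vmapS N L ((j : Int))).contains "AC"
          then (((vmapS N L ((j : Int))).takeWhile notAC).length : Int) else 0)).sum) := by
    simp only [solve]
    rw [← hn, ← hLdef, ← hstA, hR0, ← Array.foldl_toList (fun x1 x2 => x1 + x2),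
      ← Array.foldl_toList (fun x1 x2 => x1 + x2), hwa2, hacF,
      ← List.sum_eq_foldl, ← List.sum_eq_foldl]
  have hRHS : solve_alt N M P S =
      (((List.range n).map (fun j : Nat =>
          if (vmapP L ((j : Int) + 1)).contains "AC" then (1 : Int) else 0)).sum,
       ((List.range n).map (fun j : Nat =>
          if (vmapP L ((j : Int) + 1)).contains "AC"
          then (((vmapP L ((j : Int) + 1)).takeWhile notAC).length : Int) else 0)).sum) := by
    simp only [solve_alt]
    rw [← hLdef, foldB_char, hR1, List.map_map, List.map_map]
    simp only [Function.comp_def, groups_getD, cnt_eq, zero_add]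
  rw [hLHS, hRHS]
  have e1 : ∀ j : Nat,
      (if (vmapS N L ((j : Int))).contains "AC" then (1 : Int) else 0)
      = (if (vmapP L ((j : Int) + 1)).contains "AC" then (1 : Int) else 0) := by
    intro j
    rw [(hbridge j).1]
  have e2 : ∀ j : Nat,
      (if (vmapS N L ((j : Int))).contains "AC"
        then (((vmapS N L ((j : Int))).takeWhile notAC).length : Int) else 0)
      = (if (vmapP L ((j : Int) + 1)).contains "AC"
        then (((vmapP L ((j : Int) + 1)).takeWhile notAC).length : Int) else 0) := by
    intro j
    by_cases hc : (vmapS N L ((j : Int))).contains "AC" = true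
    · rw [if_pos hc, (hbridge j).2 hc, if_pos (((hbridge j).1).symm.trans hc  )]
    · rw [if_neg hc, if_neg (by rw [← (hbridge j).1]; exact hc)]
  rw [List.map_congr_left (fun j _ => e1 j), List.map_congr_left (fun j _ => e2 j)]
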